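-- pv_equiv track=rewrite | github.com/ULinuxdays/javelin_tracker | scripts/debug_env.py | _filter_freeze_lines
-- ===== SOURCE A (Python) =====
-- def _filter_freeze_lines(lines: list[str]) -> list[str]:
--     out: list[str] = []
--     seen: set[str] = set()
--     for raw in lines:
--         line = raw.strip()
--         if not line:
--             continue
--         if line.startswith("#"):
--             continue
--         # Drop editable installs and local file references (repo itself will be installed separately).
--         if line.startswith("-e "):
--             continue
--         if " @ file://" in line or " @ " in line and "://" in line:
--             continue
--         # Normalize name casing for dedupe: package==version
--         key = line.lower()
--         if key in seen:
--             continue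
--         seen.add(key)
--         out.append(line)
--     return sorted(out, key=lambda s: s.lower())
-- ===== SOURCE B (Python) =====
-- def _filter_freeze_lines(lines: list[str]) -> list[str]:
--     kept: list[str] = []
--     for raw in lines:
--         line = raw.strip()
--         if (line and not line.startswith("#") and not line.startswith("-e ")
--                 and not (" @ file://" in line or (" @ " in line and "://" in line))):
--             kept.append(line)
--     kept.sort(key=str.lower)
--     result: list[str] = []
--     last_key = None
--     for line in kept:
--         key = line.lower()
--         if key != last_key:
--             result.append(line)
--             last_key = key
--     return result
-- ===== Notes on version B (the rewrite author's own statement) =====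
-- stated objective: alternative
-- what changed: Replaces the maintained `seen` set (dedupe-during-scan, then sort) with sort-first followed by a single adjacent-dedup pass over the sorted list, relying on sort stability to keep the first-seen casing.
import Mathlib
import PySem

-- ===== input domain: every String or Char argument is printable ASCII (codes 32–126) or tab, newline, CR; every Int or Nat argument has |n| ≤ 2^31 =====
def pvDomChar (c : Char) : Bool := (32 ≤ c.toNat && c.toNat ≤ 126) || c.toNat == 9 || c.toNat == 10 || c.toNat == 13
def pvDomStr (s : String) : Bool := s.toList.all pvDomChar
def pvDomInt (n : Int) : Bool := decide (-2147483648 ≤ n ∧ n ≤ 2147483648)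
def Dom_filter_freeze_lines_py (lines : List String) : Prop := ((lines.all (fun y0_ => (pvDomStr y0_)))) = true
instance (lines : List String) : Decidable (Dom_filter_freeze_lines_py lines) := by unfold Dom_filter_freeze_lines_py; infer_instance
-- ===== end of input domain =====

-- B replaces A's maintained `seen` set (dedupe while scanning, then sort) with sort-first and a single
-- adjacent-dedup pass, relying on sort stability to keep the first-seen casing; same cost, different decomposition.

-- ===== PORT A =====
def pvStepA (st : List String × PySem.Set String) (raw : String) : List String × PySem.Set String :=
  let line := PySem.Str.strip raw
  if line == "" then st
  else if PySem.Str.startswith line "#" then st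
  else if PySem.Str.startswith line "-e " then st
  else if PySem.Str.isIn " @ file://" line || (PySem.Str.isIn " @ " line && PySem.Str.isIn "://" line) then st
  else
    let key := PySem.Str.lower line
    if PySem.Set.contains st.2 key then st
    else (st.1 ++ [line], PySem.Set.add st.2 key)

def filter_freeze_lines_py (lines : List String) : List String :=
  let st := lines.foldl pvStepA ([], PySem.Set.empty)
  PySem.List.sorted st.1 (fun s => PySem.Str.lower s)

-- ===== PORT B =====
-- the combined filter condition of Source B (on the already-stripped line)
def pvCondB (line : String) : Bool :=
  !(line == "") && !(PySem.Str.startswith line "#") && !(PySem.Str.startswith line "-e ") &&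
    !(PySem.Str.isIn " @ file://" line || (PySem.Str.isIn " @ " line && PySem.Str.isIn "://" line))

def pvStepB (st : List String × Option String) (line : String) : List String × Option String :=
  let key := PySem.Str.lower line
  if st.2 == some key then st else (st.1 ++ [line], some key)

def filter_freeze_lines_py_alt (lines : List String) : List String :=
  let kept := lines.foldl (fun acc raw => let line := PySem.Str.strip raw;
                if pvCondB line then acc ++ [line] else acc) []
  let sortedKept := PySem.List.sorted kept (fun s => PySem.Str.lower s)
  (sortedKept.foldl pvStepB ([], none)).1

-- ===== PRECONDITION & SPEC =====
def Spec_filter_freeze_lines_py (lines : List String) (out : List String) : Prop := out = filter_freeze_lines_py_alt lines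
instance (lines : List String) (out : List String) : Decidable (Spec_filter_freeze_lines_py lines out) := by unfold Spec_filter_freeze_lines_py; infer_instance

-- ===== CLAIM (what is proved, stated in full; the proofs are below) =====
def Claim_equal_filter_freeze_lines_py : Prop := ∀ (lines : List String), Dom_filter_freeze_lines_py lines → Spec_filter_freeze_lines_py lines (filter_freeze_lines_py lines)

-- ===== LEMMAS AND PROOFS =====
-- proof-side helpers
def pvLow (s : String) : String := PySem.Str.lower s

def pvIns (x : String) (l : List String) : List String :=
  PySem.List.insertBy (fun a b => decide (PySem.Str.lower a < PySem.Str.lower b)) x l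

def pvGo (k : String) : List String → List String
  | [] => []
  | y :: ys => if pvLow y == k then pvGo k ys else y :: pvGo (pvLow y) ys

def pvAdj : List String → List String
  | [] => []
  | y :: ys => y :: pvGo (pvLow y) ys

def pvDStep (st : List String × PySem.Set String) (line : String) : List String × PySem.Set String :=
  if PySem.Set.contains st.2 (pvLow line) then st
  else (st.1 ++ [line], PySem.Set.add st.2 (pvLow line))

def pvDf (seen : PySem.Set String) : List String → List String
  | [] => []
  | y :: ys => if PySem.Set.contains seen (pvLow y) then pvDf seen ys
               else y :: pvDf (PySem.Set.add seen (pvLow y)) ys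

-- A's loop body, re-expressed through the shared filter condition and the dedup step
lemma pvStepA_eq (st : List String × PySem.Set String) (raw : String) :
    pvStepA st raw = if pvCondB (PySem.Str.strip raw) then pvDStep st (PySem.Str.strip raw) else st := by
  simp only [pvStepA, pvCondB, pvDStep, pvLow]
  cases h1 : PySem.Str.strip raw == "" <;>
  cases h2 : PySem.Str.startswith (PySem.Str.strip raw) "#" <;>
  cases h3 : PySem.Str.startswith (PySem.Str.strip raw) "-e " <;>
  cases h4 : (PySem.Str.isIn " @ file://" (PySem.Str.strip raw) ||
      (PySem.Str.isIn " @ " (PySem.Str.strip raw) && PySem.Str.isIn "://" (PySem.Str.strip raw))) <;>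
  simp

-- A's loop = dedup fold over the kept stripped lines
lemma pvDfold_fst (ls : List String) : ∀ (out : List String) (seen : PySem.Set String),
    (ls.foldl pvDStep (out, seen)).1 = out ++ pvDf seen ls := by
  induction ls with
  | nil => intro out seen; simp [pvDf]
  | cons y ys ih =>
    intro out seen
    by_cases h : pvLow y ∈ (seen : List String)
    · simp [pvDStep, pvDf, h, ih]
    · simp [pvDStep, pvDf, h, ih]

lemma pvA_out (lines : List String) :
    (lines.foldl pvStepA ([], PySem.Set.empty)).1 =
      pvDf PySem.Set.empty ((lines.filter (fun r => pvCondB (PySem.Str.strip r))).map PySem.Str.strip) := by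
  have hstep : pvStepA = fun st raw =>
      if pvCondB (PySem.Str.strip raw) then pvDStep st (PySem.Str.strip raw) else st :=
    funext fun st => funext fun raw => pvStepA_eq st raw
  rw [hstep, PySem.List.foldl_if_eq_foldl_filter, ← List.foldl_map, pvDfold_fst]
  simp

-- B's kept list
lemma pvB_kept (lines : List String) :
    lines.foldl (fun acc raw => let line := PySem.Str.strip raw;
        if pvCondB line then acc ++ [line] else acc) [] =
      (lines.filter (fun r => pvCondB (PySem.Str.strip r))).map PySem.Str.strip := by
  have := PySem.List.foldl_append_if (fun r => pvCondB (PySem.Str.strip r)) PySem.Str.strip lines []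
  simpa using this

-- B's dedup loop = pvGo / pvAdj
lemma pvBfold_go (l : List String) : ∀ (out : List String) (k : String),
    (l.foldl pvStepB (out, some k)).1 = out ++ pvGo k l := by
  induction l with
  | nil => intro out k; simp [pvGo]
  | cons y ys ih =>
    intro out k
    by_cases h : PySem.Str.lower y = k
    · simp [pvStepB, pvGo, pvLow, h, ih]
    · have h' : ¬ (k = PySem.Str.lower y) := fun hc => h hc.symm
      simp [pvStepB, pvGo, pvLow, h, h', ih]

lemma pvBfold_none (l : List String) :
    (l.foldl pvStepB ([], none)).1 = pvAdj l := by
  cases l with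
  | nil => simp [pvAdj]
  | cons y ys => simp [pvStepB, pvAdj, pvBfold_go, pvLow]

-- sorted of a snoc is an ordered insertion (stability, by construction)
lemma pv_sorted_snoc (ls : List String) (x : String) :
    PySem.List.sorted (ls ++ [x]) (fun s => PySem.Str.lower s) =
      pvIns x (PySem.List.sorted ls (fun s => PySem.Str.lower s)) := by
  rw [PySem.List.sorted_eq_foldl_insertBy, PySem.List.sorted_eq_foldl_insertBy, List.foldl_append]
  simp [pvIns]

lemma pvIns_nil (x : String) : pvIns x [] = [x] := rfl

lemma pvIns_cons (x y : String) (ys : List String) :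
    pvIns x (y :: ys) = if PySem.Str.lower x < PySem.Str.lower y then x :: y :: ys
      else y :: pvIns x ys := by
  simp [pvIns, PySem.List.insertBy]

lemma pvDf_snoc_mem (ls : List String) : ∀ (seen : PySem.Set String) (x : String),
    (pvLow x ∈ (seen : List String) ∨ pvLow x ∈ ls.map pvLow) →
    pvDf seen (ls ++ [x]) = pvDf seen ls := by
  induction ls with
  | nil =>
    intro seen x hm
    have hm' : pvLow x ∈ (seen : List String) := by simpa using hm
    simp [pvDf, hm']
  | cons y ys ih =>
    intro seen x hm
    by_cases hy : pvLow y ∈ (seen : List String)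
    · have hm' : pvLow x ∈ (seen : List String) ∨ pvLow x ∈ ys.map pvLow := by
        rcases hm with h | h
        · exact Or.inl h
        · simp only [List.map_cons, List.mem_cons] at h
          rcases h with h | h
          · exact Or.inl (h ▸ hy)
          · exact Or.inr h
      simp [pvDf, hy, ih _ _ hm']
    · have hm' : pvLow x ∈ (PySem.Set.add seen (pvLow y) : List String) ∨ pvLow x ∈ ys.map pvLow := by
        rcases hm with h | h
        · exact Or.inl (by simp [PySem.Set.mem_add, h])
        · simp only [List.map_cons, List.mem_cons] at h
          rcases h with h | h
          · exact Or.inl (by simp [PySem.Set.mem_add, h])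
          · exact Or.inr h
      have hadd : PySem.Set.add seen (pvLow y) = seen ++ [pvLow y] := by
        simp [PySem.Set.add, PySem.Set.contains, hy]
      rw [hadd] at hm'
      simp [pvDf, hy, ih _ _ hm']

lemma pvDf_snoc_not_mem (ls : List String) : ∀ (seen : PySem.Set String) (x : String),
    pvLow x ∉ (seen : List String) → pvLow x ∉ ls.map pvLow →
    pvDf seen (ls ++ [x]) = pvDf seen ls ++ [x] := by
  induction ls with
  | nil =>
    intro seen x hs _
    simp [pvDf, hs]
  | cons y ys ih =>
    intro seen x hs hm
    simp only [List.map_cons, List.mem_cons, not_or] at hm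
    obtain ⟨hxy, hm2⟩ := hm
    by_cases hy : pvLow y ∈ (seen : List String)
    · simp [pvDf, hy, ih _ _ hs hm2]
    · have hs' : pvLow x ∉ (PySem.Set.add seen (pvLow y) : List String) := by
        simp [PySem.Set.mem_add, hs, hxy]
      have hadd : PySem.Set.add seen (pvLow y) = seen ++ [pvLow y] := by
        simp [PySem.Set.add, PySem.Set.contains, hy]
      rw [hadd] at hs'
      simp [pvDf, hy, ih _ _ hs' hm2]

-- key-present insertion is invisible to adjacent dedup
lemma pvGo_ins_mem (l : List String) : ∀ (k x : String),
    l.Pairwise (fun a b => pvLow a ≤ pvLow b) → (∀ y ∈ l, k ≤ pvLow y) → k ≤ pvLow x →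
    (pvLow x = k ∨ pvLow x ∈ l.map pvLow) → pvGo k (pvIns x l) = pvGo k l := by
  induction l with
  | nil =>
    intro k x _ _ _ hm
    have hxk : PySem.Str.lower x = k := by simpa [pvLow] using hm
    simp [pvIns_nil, pvGo, pvLow, hxk]
  | cons y ys ih =>
    intro k x hp hk hkx hm
    rw [List.pairwise_cons] at hp
    obtain ⟨hy1, hp2⟩ := hp
    rw [pvIns_cons]
    by_cases hlt : PySem.Str.lower x < PySem.Str.lower y
    · have hxk : pvLow x = k := by
        rcases hm with h | h
        · exact h
        · simp only [List.map_cons, List.mem_cons] at h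
          rcases h with h | h
          · exact absurd h (by simpa [pvLow] using ne_of_lt hlt)
          · obtain ⟨z, hz, hzeq⟩ := List.mem_map.mp h
            have := hy1 z hz
            exact absurd (hzeq ▸ this) (by simpa [pvLow] using not_le_of_gt hlt)
      have hxk' : PySem.Str.lower x = k := by simpa [pvLow] using hxk
      rw [if_pos hlt]
      simp [pvGo, pvLow, hxk']
    · have hyx : PySem.Str.lower y ≤ PySem.Str.lower x := le_of_not_gt hlt
      rw [if_neg hlt]
      by_cases hyk : PySem.Str.lower y = k
      · have hm' : pvLow x = k ∨ pvLow x ∈ ys.map pvLow := by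
          rcases hm with h | h
          · exact Or.inl h
          · simp only [List.map_cons, List.mem_cons] at h
            rcases h with h | h
            · exact Or.inl (by simpa [pvLow, hyk] using h)
            · exact Or.inr h
        have hk' : ∀ z ∈ ys, k ≤ pvLow z := fun z hz => by
          have := hy1 z hz
          simp only [pvLow] at this ⊢
          exact hyk ▸ this
        have h1 : pvGo k (y :: pvIns x ys) = pvGo k (pvIns x ys) := by simp [pvGo, pvLow, hyk]
        have h2 : pvGo k (y :: ys) = pvGo k ys := by simp [pvGo, pvLow, hyk]
        rw [h1, h2, ih k x hp2 hk' hkx hm']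
      · have hm' : pvLow x = PySem.Str.lower y ∨ pvLow x ∈ ys.map pvLow := by
          rcases hm with h | h
          · exfalso
            have hky : k ≤ PySem.Str.lower y := hk y (List.mem_cons_self ..)
            exact hyk (le_antisymm (le_trans hyx (le_of_eq (by simpa [pvLow] using h))) hky)
          · simp only [List.map_cons, List.mem_cons] at h
            rcases h with h | h
            · exact Or.inl (by simpa [pvLow] using h)
            · exact Or.inr h
        have h1 : pvGo k (y :: pvIns x ys) = y :: pvGo (PySem.Str.lower y) (pvIns x ys) := by
          simp [pvGo, pvLow, hyk]
        have h2 : pvGo k (y :: ys) = y :: pvGo (PySem.Str.lower y) ys := by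
          simp [pvGo, pvLow, hyk]
        rw [h1, h2, ih (PySem.Str.lower y) x hp2 (by simpa [pvLow] using hy1)
          (by simpa [pvLow] using hyx) hm']

lemma pvAdj_ins_mem (l : List String) (x : String)
    (hp : l.Pairwise (fun a b => pvLow a ≤ pvLow b)) (hm : pvLow x ∈ l.map pvLow) :
    pvAdj (pvIns x l) = pvAdj l := by
  cases l with
  | nil => simp at hm
  | cons y ys =>
    rw [List.pairwise_cons] at hp
    obtain ⟨hy1, hp2⟩ := hp
    rw [pvIns_cons]
    by_cases hlt : PySem.Str.lower x < PySem.Str.lower y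
    · exfalso
      simp only [List.map_cons, List.mem_cons] at hm
      rcases hm with h | h
      · exact absurd h (by simpa [pvLow] using ne_of_lt hlt)
      · obtain ⟨z, hz, hzeq⟩ := List.mem_map.mp h
        exact absurd (hzeq ▸ hy1 z hz) (by simpa [pvLow] using not_le_of_gt hlt)
    · have hm' : pvLow x = PySem.Str.lower y ∨ pvLow x ∈ ys.map pvLow := by
        simpa [pvLow] using hm
      rw [if_neg hlt]
      simp only [pvAdj]
      rw [pvGo_ins_mem ys _ x hp2 hy1 (by simpa [pvLow] using le_of_not_gt hlt) hm']

-- key-new insertion commutes with adjacent dedup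
lemma pvGo_ins_not_mem (l : List String) : ∀ (k x : String),
    k ≤ pvLow x → pvLow x ≠ k → pvLow x ∉ l.map pvLow →
    pvGo k (pvIns x l) = pvIns x (pvGo k l) := by
  induction l with
  | nil =>
    intro k x _ hne _
    have hne' : ¬ PySem.Str.lower x = k := by simpa [pvLow] using hne
    simp [pvIns_nil, pvGo, pvLow, hne']
  | cons y ys ih =>
    intro k x hk hne hm
    have hne' : ¬ PySem.Str.lower x = k := by simpa [pvLow] using hne
    simp only [List.map_cons, List.mem_cons, not_or] at hm
    obtain ⟨hxy, hm2⟩ := hm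
    have hyx' : ¬ PySem.Str.lower y = PySem.Str.lower x := fun h =>
      hxy (by simpa [pvLow] using h.symm)
    rw [pvIns_cons]
    by_cases hlt : PySem.Str.lower x < PySem.Str.lower y
    · have hyk : ¬ (PySem.Str.lower y = k) := by
        intro hyk
        have hyx2 : PySem.Str.lower y ≤ PySem.Str.lower x := by
          rw [hyk]; simpa [pvLow] using hk
        exact absurd hlt (not_lt_of_ge hyx2)
      rw [if_pos hlt]
      have h1 : pvGo k (x :: y :: ys) = x :: y :: pvGo (PySem.Str.lower y) ys := by
        simp [pvGo, pvLow, hne', hyx']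
      have h2 : pvGo k (y :: ys) = y :: pvGo (PySem.Str.lower y) ys := by
        simp [pvGo, pvLow, hyk]
      rw [h1, h2, pvIns_cons, if_pos hlt]
    · have hyx : PySem.Str.lower y ≤ PySem.Str.lower x := le_of_not_gt hlt
      rw [if_neg hlt]
      by_cases hyk : PySem.Str.lower y = k
      · have h1 : pvGo k (y :: pvIns x ys) = pvGo k (pvIns x ys) := by simp [pvGo, pvLow, hyk]
        have h2 : pvGo k (y :: ys) = pvGo k ys := by simp [pvGo, pvLow, hyk]
        rw [h1, h2, ih k x hk hne hm2]
      · have h1 : pvGo k (y :: pvIns x ys) = y :: pvGo (PySem.Str.lower y) (pvIns x ys) := by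
          simp [pvGo, pvLow, hyk]
        have h2 : pvGo k (y :: ys) = y :: pvGo (PySem.Str.lower y) ys := by
          simp [pvGo, pvLow, hyk]
        rw [h1, h2, ih (PySem.Str.lower y) x (by simpa [pvLow] using hyx)
          (by simpa [pvLow] using hxy) hm2, pvIns_cons, if_neg hlt]

lemma pvAdj_ins_not_mem (l : List String) (x : String)
    (hm : pvLow x ∉ l.map pvLow) :
    pvAdj (pvIns x l) = pvIns x (pvAdj l) := by
  cases l with
  | nil => simp [pvIns_nil, pvAdj, pvGo]
  | cons y ys =>
    simp only [List.map_cons, List.mem_cons, not_or] at hm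
    obtain ⟨hxy, hm2⟩ := hm
    have hyx' : ¬ PySem.Str.lower y = PySem.Str.lower x := fun h =>
      hxy (by simpa [pvLow] using h.symm)
    rw [pvIns_cons]
    by_cases hlt : PySem.Str.lower x < PySem.Str.lower y
    · rw [if_pos hlt]
      have h1 : pvAdj (x :: y :: ys) = x :: y :: pvGo (PySem.Str.lower y) ys := by
        simp [pvAdj, pvGo, pvLow, hyx']
      have h3 : pvAdj (y :: ys) = y :: pvGo (PySem.Str.lower y) ys := by simp [pvAdj, pvLow]
      rw [h1, h3, pvIns_cons, if_pos hlt]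
    · rw [if_neg hlt]
      have h1 : pvAdj (y :: pvIns x ys) = y :: pvGo (PySem.Str.lower y) (pvIns x ys) := by
        simp [pvAdj, pvLow]
      have h3 : pvAdj (y :: ys) = y :: pvGo (PySem.Str.lower y) ys := by simp [pvAdj, pvLow]
      rw [h1, h3, pvGo_ins_not_mem ys (PySem.Str.lower y) x
        (by simpa [pvLow] using le_of_not_gt hlt)
        (fun h => hxy (by simpa [pvLow] using h)) hm2, pvIns_cons, if_neg hlt]

-- main: adjacent dedup after stable sort = sort after first-occurrence dedup
lemma pv_main (ls : List String) :
    pvAdj (PySem.List.sorted ls (fun s => PySem.Str.lower s)) =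
      PySem.List.sorted (pvDf PySem.Set.empty ls) (fun s => PySem.Str.lower s) := by
  induction ls using List.reverseRecOn with
  | nil => rfl
  | append_singleton ls x ih =>
    rw [pv_sorted_snoc]
    have hp : (PySem.List.sorted ls (fun s => PySem.Str.lower s)).Pairwise
        (fun a b => pvLow a ≤ pvLow b) := PySem.List.sorted_pairwise ls _
    by_cases hm : pvLow x ∈ ls.map pvLow
    · have hm' : pvLow x ∈ (PySem.List.sorted ls (fun s => PySem.Str.lower s)).map pvLow := by
        simp only [List.mem_map] at hm ⊢
        obtain ⟨z, hz, hzeq⟩ := hm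
        exact ⟨z, (PySem.List.mem_sorted ls _ false z).mpr hz, hzeq⟩
      rw [pvAdj_ins_mem _ _ hp hm', ih, pvDf_snoc_mem ls _ x (Or.inr hm)]
    · have hm' : pvLow x ∉ (PySem.List.sorted ls (fun s => PySem.Str.lower s)).map pvLow := by
        intro hc
        simp only [List.mem_map] at hc hm
        obtain ⟨z, hz, hzeq⟩ := hc
        exact hm ⟨z, (PySem.List.mem_sorted ls _ false z).mp hz, hzeq⟩
      rw [pvAdj_ins_not_mem _ _ hm', ih,
        pvDf_snoc_not_mem ls _ x (by simp [PySem.Set.empty]) hm, pv_sorted_snoc]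

-- ===== VERDICT (by name: the statement is the Claim_ definition above) =====
theorem filter_freeze_lines_py_spec : Claim_equal_filter_freeze_lines_py := by
  intro lines _
  have hA : filter_freeze_lines_py lines =
      PySem.List.sorted (lines.foldl pvStepA ([], PySem.Set.empty)).1 (fun s => PySem.Str.lower s) := rfl
  have hB : filter_freeze_lines_py_alt lines =
      ((PySem.List.sorted (lines.foldl (fun acc raw => let line := PySem.Str.strip raw;
          if pvCondB line then acc ++ [line] else acc) []) (fun s => PySem.Str.lower s)).foldl
        pvStepB ([], none)).1 := rfl
  unfold Spec_filter_freeze_lines_py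
  rw [hA, hB, pvA_out, pvB_kept, pvBfold_none, pv_main]
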